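-- pv_equiv track=rewrite | github.com/OliwiaLewandowska/som-monitor | theme_analyzer.py | _extract_brand_contexts
-- ===== SOURCE A (Python) =====
-- from typing import Dict, List, Tuple, Set, Optional
--
-- def _extract_brand_contexts(text: str, brand: str,
--                            window: int = 150) -> List[str]:
--     """
--     Extract text context around brand mentions
--
--     Args:
--         text: Full response text
--         brand: Brand name to find
--         window: Characters to include before/after mention
--
--     Returns:
--         List of context strings
--     """
--     contexts = []
--     brand_lower = brand.lower()
--     text_lower = text.lower()
--
--     # Find all occurrences
--     start = 0
--     while True:
--         pos = text_lower.find(brand_lower, start)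
--         if pos == -1:
--             break
--
--         # Extract context window
--         context_start = max(0, pos - window)
--         context_end = min(len(text), pos + len(brand) + window)
--         context = text[context_start:context_end]
--
--         contexts.append(context)
--         start = pos + 1
--
--     return contexts
-- ===== SOURCE B (Python) =====
-- def _extract_brand_contexts(text: str, brand: str, window: int = 150) -> list:
--     """Naive substring scan: test each candidate start index with startswith
--     and slice a context window around every match."""
--     brand_lower = brand.lower()
--     text_lower = text.lower()
--     n = len(text)
--     return [
--         text[max(0, i - window): min(n, i + len(brand) + window)]
--         for i in range(n - len(brand_lower) + 1)
--         if text_lower.startswith(brand_lower, i)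
--     ]
-- ===== Notes on version B (the rewrite author's own statement) =====
-- stated objective: alternative
-- what changed: A's repeated text_lower.find(brand_lower, start)/start=pos+1 while-loop is replaced by the canonical naive substring scan: one list comprehension over candidate start indices range(n - m + 1) keeping those where text_lower.startswith(brand_lower, i), slicing the context with the same formulas.
import Mathlib
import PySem

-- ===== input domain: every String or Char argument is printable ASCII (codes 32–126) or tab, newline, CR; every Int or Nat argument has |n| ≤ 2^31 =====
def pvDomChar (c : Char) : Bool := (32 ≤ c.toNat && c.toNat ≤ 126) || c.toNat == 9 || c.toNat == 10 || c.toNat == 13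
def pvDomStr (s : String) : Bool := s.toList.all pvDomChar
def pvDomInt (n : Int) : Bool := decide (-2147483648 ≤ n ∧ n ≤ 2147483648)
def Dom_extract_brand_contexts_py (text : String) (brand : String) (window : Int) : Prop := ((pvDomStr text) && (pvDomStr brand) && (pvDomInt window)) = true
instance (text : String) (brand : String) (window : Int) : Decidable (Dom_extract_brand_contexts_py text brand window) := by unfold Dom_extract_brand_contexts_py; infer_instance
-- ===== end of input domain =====

-- B replaces A's repeated str.find/advance-by-one loop by the canonical naive substring scan:
-- one comprehension over the candidate start indices range(n - m + 1) testing startswith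
-- (objective: alternative; same results, same slicing formulas).

-- ===== PORT A =====
-- A's `while True: pos = text_lower.find(brand_lower, start) …` loop; `fuel` only bounds the
-- recursion (tl.length + 2 steps always suffice, since `start` strictly increases and the
-- loop stops once `start` passes the end of the text).
def pvALoop (text tl bl : List Char) (blen : Nat) (window : Int) : Nat → Nat → List (List Char)
  | 0, _ => []
  | fuel + 1, start =>
      let pos := PySem.Chars.findFrom tl bl (start : Int) none
      if pos = -1 then []
      else
        let p := pos.toNat
        PySem.List.slice text (some (max 0 ((p : Int) - window)))
            (some (min ((text.length : Int)) ((p : Int) + (blen : Int) + window)))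
          :: pvALoop text tl bl blen window fuel (p + 1)

def extract_brand_contexts_py (text : String) (brand : String) (window : Int) : List String :=
  let bl := PySem.Chars.lower brand.toList
  let tl := PySem.Chars.lower text.toList
  (pvALoop text.toList tl bl brand.toList.length window (tl.length + 2) 0).map String.ofList

-- ===== PORT B =====
-- Source B's comprehension: range(n - len(brand_lower) + 1) (a Python range over a possibly
-- negative bound, hence the Int subtraction and .toNat), startswith at offset i ported as
-- startswith on the drop-i suffix (exact for 0 ≤ i).
def extract_brand_contexts_py_alt (text : String) (brand : String) (window : Int) : List String :=
  let bl := PySem.Chars.lower brand.toList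
  let tl := PySem.Chars.lower text.toList
  let n := text.toList.length
  ((List.range ((n : Int) - (bl.length : Int) + 1).toNat).filter
      (fun (i : Nat) => PySem.Chars.startswith (tl.drop i) bl)).map
    (fun (i : Nat) => String.ofList (PySem.List.slice text.toList (some (max 0 ((i : Int) - window)))
        (some (min (n : Int) ((i : Int) + (brand.toList.length : Int) + window)))))

-- ===== PRECONDITION & SPEC =====
def Spec_extract_brand_contexts_py (text : String) (brand : String) (window : Int) (out : List String) : Prop := out = extract_brand_contexts_py_alt text brand window
instance (text : String) (brand : String) (window : Int) (out : List String) : Decidable (Spec_extract_brand_contexts_py text brand window out) := by unfold Spec_extract_brand_contexts_py; infer_instance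

-- ===== CLAIM (what is proved, stated in full; the proofs are below) =====
def Claim_equal_extract_brand_contexts_py : Prop := ∀ (text : String) (brand : String) (window : Int), Dom_extract_brand_contexts_py text brand window → Spec_extract_brand_contexts_py text brand window (extract_brand_contexts_py text brand window)

-- ===== LEMMAS AND PROOFS =====

lemma pv_len_lower (xs : List Char) : (PySem.Chars.lower xs).length = xs.length := by
  simp [PySem.Chars.lower]

-- the slice-equality match test at index i is exactly "bl is a prefix of tl.drop i".
lemma pv_q_iff (tl bl : List Char) (i : Nat) :
    (PySem.List.slice tl (some (i : Int)) (some ((i : Int) + (bl.length : Int))) == bl) = true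
      ↔ bl <+: tl.drop i := by
  rw [PySem.List.slice_natCast_add, beq_iff_eq, List.prefix_iff_eq_take, eq_comm]

-- CPython quirk: find with a start just past the end returns -1.
lemma pv_findFrom_past (tl bl : List Char) :
    PySem.Chars.findFrom tl bl ((tl.length : Int) + 1) none = -1 := by
  simp only [PySem.Chars.findFrom]
  split_ifs with h1 h2 <;> first | rfl | omega

-- if findFrom ≠ -1 at k ≤ len then the found position is ≤ len
lemma pv_findFrom_le (tl bl : List Char) (k : Nat) (hk : k ≤ tl.length)
    (_h : PySem.Chars.findFrom tl bl (k : Int) none ≠ -1) :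
    PySem.Chars.findFrom tl bl (k : Int) none ≤ (tl.length : Int) := by
  rw [PySem.Chars.findFrom_natCast tl bl k hk]
  split_ifs at * with hf
  · omega
  · have := PySem.Chars.find_le_length (tl.drop k) bl
    simp only [List.length_drop] at this
    omega

-- no match ≥ k once findFrom from k returned -1
lemma pv_no_match (tl bl : List Char) (k : Nat) (hk : k ≤ tl.length)
    (h : PySem.Chars.findFrom tl bl (k : Int) none = -1) :
    ∀ i, k ≤ i → ¬ bl <+: tl.drop i := by
  rw [PySem.Chars.findFrom_natCast_eq_neg_one_iff tl bl k hk] at h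
  intro i hi hpre
  apply h
  rw [← PySem.Chars.isIn_iff_infix, ← PySem.Chars.exists_prefix_drop_iff_isIn]
  refine ⟨i - k, ?_⟩
  rwa [List.drop_drop, Nat.add_sub_cancel' hi]

-- peeling the first match out of a filtered range
lemma pv_filter_range_min (q : Nat → Bool) (N k p : Nat) (hkp : k ≤ p) (hpN : p < N)
    (hq : q p = true) (hmin : ∀ i, k ≤ i → i < p → q i = false) :
    (List.range N).filter (fun i => decide (k ≤ i) && q i)
      = p :: (List.range N).filter (fun i => decide (p + 1 ≤ i) && q i) := by
  have hN : N = (p + 1) + (N - (p + 1)) := by omega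
  rw [hN, List.range_add, List.range_succ]
  have h1 : (List.range p).filter (fun i => decide (k ≤ i) && q i) = [] := by
    rw [List.filter_eq_nil_iff]
    intro a ha
    have hap : a < p := List.mem_range.mp ha
    by_cases hka : k ≤ a
    · simp [hka, hmin a hka hap]
    · simp [hka]
  have h2 : (List.range p).filter (fun i => decide (p + 1 ≤ i) && q i) = [] := by
    rw [List.filter_eq_nil_iff]
    intro a ha
    have hap : a < p := List.mem_range.mp ha
    simp [Nat.not_le.mpr (by omega : a < p + 1)]
  have h3 : ∀ a ∈ List.range (N - (p + 1)),
      (decide (k ≤ p + 1 + a) && q (p + 1 + a)) = (decide (p + 1 ≤ p + 1 + a) && q (p + 1 + a)) := by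
    intro a _
    have hka : k ≤ p + 1 + a := by omega
    simp [hka]
  simp only [List.filter_append, h1, h2, List.filter_map, List.nil_append, Function.comp_def]
  rw [List.filter_congr h3]
  simp [hq, hkp]

-- a filtered range may be shrunk past the last index where the predicate can hold
lemma pv_filter_range_shrink (q : Nat → Bool) (N M : Nat) (h : N ≤ M)
    (hq : ∀ i, N ≤ i → i < M → q i = false) :
    (List.range M).filter q = (List.range N).filter q := by
  rw [show M = N + (M - N) by omega, List.range_add, List.filter_append]
  have h2 : ((List.range (M - N)).map (N + ·)).filter q = [] := by
    rw [List.filter_eq_nil_iff]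
    intro a ha
    obtain ⟨b, hb, rfl⟩ := List.mem_map.mp ha
    have hbM : b < M - N := List.mem_range.mp hb
    simp [hq (N + b) (by omega) (by omega)]
  simp [h2]

-- A's find loop produces exactly the contexts at the matching indices ≥ start, in order.
lemma pvALoop_spec (text tl bl : List Char) (blen : Nat) (w : Int) :
    ∀ (fuel start : Nat), tl.length + 2 ≤ fuel + start → start ≤ tl.length + 1 →
      pvALoop text tl bl blen w fuel start =
        ((List.range (tl.length + 1)).filter
            (fun (i : Nat) => decide (start ≤ i) &&
              (PySem.List.slice tl (some (i : Int)) (some ((i : Int) + (bl.length : Int))) == bl))).map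
          (fun (p : Nat) => PySem.List.slice text (some (max 0 ((p : Int) - w)))
              (some (min ((text.length : Int)) ((p : Int) + (blen : Int) + w)))) := by
  intro fuel
  induction fuel with
  | zero => intro start h1 h2; omega
  | succ f ih =>
    intro start h1 h2
    by_cases hlen : start ≤ tl.length
    · by_cases hpos : PySem.Chars.findFrom tl bl (start : Int) none = -1
      · simp only [pvALoop, hpos, if_true]
        symm
        rw [List.map_eq_nil_iff, List.filter_eq_nil_iff]
        intro a _
        by_cases hka : start ≤ a
        · have hnm : ¬ bl <+: tl.drop a := pv_no_match tl bl start hlen hpos a hka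
          simp only [Bool.and_eq_true, decide_eq_true_eq, not_and]
          intro _ hc
          exact hnm ((pv_q_iff tl bl a).mp hc)
        · simp [hka]
      · obtain ⟨hge, hpre, hmin⟩ := PySem.Chars.findFrom_natCast_spec tl bl start hlen hpos
        have hle := pv_findFrom_le tl bl start hlen hpos
        have h0 : (0 : Int) ≤ PySem.Chars.findFrom tl bl (start : Int) none :=
          le_trans (Int.natCast_nonneg start) hge
        set P := (PySem.Chars.findFrom tl bl (start : Int) none).toNat with hP
        have hgeN : start ≤ P := by omega
        have hPle : P ≤ tl.length := by omega
        simp only [pvALoop, hpos, if_false, ← hP]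
        rw [ih (P + 1) (by omega) (by omega)]
        rw [pv_filter_range_min
              (fun (i : Nat) => PySem.List.slice tl (some (i : Int)) (some ((i : Int) + (bl.length : Int))) == bl)
              (tl.length + 1) start P hgeN (by omega)
              ((pv_q_iff tl bl P).mpr hpre)
              (fun i hki hiP => by
                have hnm : ¬ bl <+: tl.drop i := hmin i hki hiP
                rw [← Bool.not_eq_true]
                intro hc
                exact hnm ((pv_q_iff tl bl i).mp hc))]
        rfl
    · have hstart : start = tl.length + 1 := by omega
      subst hstart
      have hcast : ((tl.length + 1 : Nat) : Int) = (tl.length : Int) + 1 := by push_cast; ring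
      simp only [pvALoop, hcast, pv_findFrom_past, if_true]
      symm
      rw [List.map_eq_nil_iff, List.filter_eq_nil_iff]
      intro a ha
      have : a < tl.length + 1 := List.mem_range.mp ha
      simp [Nat.not_le.mpr this]

-- ===== VERDICT (by name: the statement is the Claim_ definition above) =====
theorem extract_brand_contexts_py_spec : Claim_equal_extract_brand_contexts_py := by
  intro text brand window _
  simp only [Spec_extract_brand_contexts_py, extract_brand_contexts_py, extract_brand_contexts_py_alt]
  set tl := PySem.Chars.lower text.toList with htl
  set bl := PySem.Chars.lower brand.toList with hbl
  have hL : tl.length = text.toList.length := pv_len_lower _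
  rw [pvALoop_spec text.toList tl bl brand.toList.length window (tl.length + 2) 0 (by omega) (by omega)]
  rw [List.map_map]
  -- both sides are maps of the same function over filtered ranges; align predicate and range
  have hpred : ∀ i ∈ List.range (tl.length + 1),
      (decide (0 ≤ i) && (PySem.List.slice tl (some (i : Int)) (some ((i : Int) + (bl.length : Int))) == bl))
        = PySem.Chars.startswith (tl.drop i) bl := by
    intro i _
    simp only [Nat.zero_le, decide_true, Bool.true_and]
    by_cases h : bl <+: tl.drop i
    · rw [(pv_q_iff tl bl i).mpr h, eq_comm, PySem.Chars.startswith_iff]; exact h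
    · rw [eq_comm, Bool.eq_iff_iff, PySem.Chars.startswith_iff, pv_q_iff]
  rw [List.filter_congr hpred]
  rw [pv_filter_range_shrink (fun i => PySem.Chars.startswith (tl.drop i) bl)
        ((text.toList.length : Int) - (bl.length : Int) + 1).toNat (tl.length + 1)
        (by omega)
        (fun i hi hi2 => by
          rw [← Bool.not_eq_true, PySem.Chars.startswith_iff]
          intro hp
          have := hp.length_le
          simp only [List.length_drop] at this
          omega)]
  rfl
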